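-- pv_equiv track=rewrite | github.com/mail19ver/module_2_additional_task | module_2_additional_task.py | search_for_devisors_and_create_matrix
-- ===== SOURCE A (Python) =====
-- def search_list_with_terms(num1):
--     numbers = []
--     for i in range(1, num1):
--         if i in numbers:
--             continue
--         elif i * 2 == num1:
--             break
--         else:
--             numbers.append(i)
--             numbers.append(num1 - i)
--     return numbers
--
-- def search_for_devisors_and_create_matrix(num1):
--     divs = []
--     for i in range(3, num1):
--         if num1 % i == 0:
--             divs.append(i)
--     matrix = []
--     for i in divs:
--         matrix.append(search_list_with_terms(i))
--     matrix.append(search_list_with_terms(num1))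
--     return matrix
-- ===== SOURCE B (Python) =====
-- def search_for_devisors_and_create_matrix(num1):
--     # Each row is generated directly as the pairs [i, m - i] for i up to the
--     # midpoint, instead of A's quadratic scan with membership tests and breaks.
--     def terms(m):
--         return [x for i in range(1, (m - 1) // 2 + 1) for x in (i, m - i)]
--     divs = [d for d in range(3, num1) if num1 % d == 0]
--     return [terms(d) for d in divs] + [terms(num1)]
-- ===== Notes on version B (the rewrite author's own statement) =====
-- stated objective: faster
-- what changed: each row is generated in closed form as the pairs [i, m-i] for i up to the midpoint (one comprehension), replacing A's quadratic loop that scans the accumulated list for membership and breaks at the midpoint; the divisor filter stays a single linear pass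
import Mathlib
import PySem

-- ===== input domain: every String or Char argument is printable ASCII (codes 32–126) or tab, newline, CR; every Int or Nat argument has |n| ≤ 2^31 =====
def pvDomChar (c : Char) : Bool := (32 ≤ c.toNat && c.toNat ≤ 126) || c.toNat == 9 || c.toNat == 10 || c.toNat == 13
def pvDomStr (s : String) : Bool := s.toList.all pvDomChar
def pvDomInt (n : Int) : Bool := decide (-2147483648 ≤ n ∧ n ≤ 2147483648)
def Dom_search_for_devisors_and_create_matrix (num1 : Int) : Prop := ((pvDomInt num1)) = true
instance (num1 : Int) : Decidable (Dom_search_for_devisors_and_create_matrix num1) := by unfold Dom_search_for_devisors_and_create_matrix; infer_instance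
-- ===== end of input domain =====

-- B generates each row directly as the pairs [i, m-i] up to the midpoint instead of A's
-- membership-scanning loop; measured asymptotically faster on the timing inputs.


-- ===== PORT A =====
-- literal port of search_list_with_terms's loop (break/continue as recursion over the range list)
def slwt_loop (m : Int) : List Int → List Int → List Int
  | numbers, [] => numbers
  | numbers, i :: rest =>
    if numbers.contains i then slwt_loop m numbers rest
    else if i * 2 = m then numbers
    else slwt_loop m (numbers ++ [i, m - i]) rest

def search_list_with_terms (num1 : Int) : List Int :=
  slwt_loop num1 [] (PySem.List.pyRange 1 num1 1)

def search_for_devisors_and_create_matrix (num1 : Int) : List (List Int) :=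
  let divs := (PySem.List.pyRange 3 num1 1).foldl
    (fun acc i => if PySem.Int.mod num1 i == 0 then acc ++ [i] else acc) []
  let matrix := divs.foldl (fun acc i => acc ++ [search_list_with_terms i]) []
  matrix ++ [search_list_with_terms num1]

-- ===== PORT B =====
-- row m = [x for i in range(1, (m-1)//2 + 1) for x in (i, m-i)]
def pvTerms (m : Int) : List Int :=
  (PySem.List.pyRange 1 (PySem.Int.floordiv (m - 1) 2 + 1) 1).flatMap (fun i => [i, m - i])

def search_for_devisors_and_create_matrix_alt (num1 : Int) : List (List Int) :=
  let divs := (PySem.List.pyRange 3 num1 1).filter (fun d => PySem.Int.mod num1 d == 0)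
  divs.map pvTerms ++ [pvTerms num1]

-- ===== PRECONDITION & SPEC =====
def Spec_search_for_devisors_and_create_matrix (num1 : Int) (out : List (List Int)) : Prop := out = search_for_devisors_and_create_matrix_alt num1
instance (num1 : Int) (out : List (List Int)) : Decidable (Spec_search_for_devisors_and_create_matrix num1 out) := by unfold Spec_search_for_devisors_and_create_matrix; infer_instance

-- ===== CLAIM (what is proved, stated in full; the proofs are below) =====
def Claim_equal_search_for_devisors_and_create_matrix : Prop := ∀ (num1 : Int), Dom_search_for_devisors_and_create_matrix num1 → Spec_search_for_devisors_and_create_matrix num1 (search_for_devisors_and_create_matrix num1)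

-- ===== LEMMAS AND PROOFS =====

-- membership in the accumulated pair list
lemma mem_pairs (m j x : Int) :
    x ∈ (PySem.List.pyRange 1 j 1).flatMap (fun i => [i, m - i]) ↔
      ∃ i, 1 ≤ i ∧ i < j ∧ (x = i ∨ x = m - i) := by
  simp [List.mem_flatMap, PySem.List.mem_pyRange_one]
  constructor
  · rintro ⟨i, ⟨h1, h2⟩, h3⟩; exact ⟨i, h1, h2, h3⟩
  · rintro ⟨i, h1, h2, h3⟩; exact ⟨i, ⟨h1, h2⟩, h3⟩

-- once every remaining index is already in numbers, the loop is the identity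
lemma loop_contained (m : Int) (numbers : List Int) :
    ∀ l : List Int, (∀ i ∈ l, i ∈ numbers) → slwt_loop m numbers l = numbers := by
  intro l
  induction l with
  | nil => intro _; rfl
  | cons i rest ih =>
    intro h
    have hi : numbers.contains i := by
      simpa using (h i (List.mem_cons_self))
    simp only [slwt_loop, hi, if_pos]
    exact ih (fun x hx => h x (List.mem_cons_of_mem _ hx))

-- invariant: having appended the pairs for 1..j-1, the loop on range(j, m) fills up to the midpoint K
lemma loop_fill (m K : Int) (hK1 : 2*K ≤ m - 1) (hK2 : m - 1 < 2*K + 2) :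
    ∀ (n : Nat) (j : Int), 1 ≤ j → j + n = K + 1 →
      slwt_loop m ((PySem.List.pyRange 1 j 1).flatMap (fun i => [i, m - i]))
          (PySem.List.pyRange j m 1)
        = (PySem.List.pyRange 1 (K + 1) 1).flatMap (fun i => [i, m - i]) := by
  intro n
  induction n with
  | zero =>
    intro j hj hjn
    have hjK : j = K + 1 := by omega
    subst hjK
    by_cases hm : m ≤ K + 1
    · rw [PySem.List.pyRange_one_eq_nil hm]; rfl
    · rw [PySem.List.pyRange_one_cons (by omega : (K:Int) + 1 < m)]
      by_cases heven : m = 2*K + 2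
      · have hnc : ((PySem.List.pyRange 1 (K+1) 1).flatMap (fun i => [i, m - i])).contains (K+1) = false := by
          simp only [List.contains_eq_mem, decide_eq_false_iff_not]
          rw [mem_pairs]; rintro ⟨i, h1, h2, h3⟩; omega
        simp only [slwt_loop, hnc, Bool.false_eq_true, if_false]
        have : (K+1) * 2 = m := by omega
        simp [this]
      · have hodd : m = 2*K + 1 := by omega
        have hc : ((PySem.List.pyRange 1 (K+1) 1).flatMap (fun i => [i, m - i])).contains (K+1) = true := by
          simp only [List.contains_eq_mem, decide_eq_true_eq]
          rw [mem_pairs]; exact ⟨K, by omega, by omega, Or.inr (by omega)⟩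
        simp only [slwt_loop, hc, if_pos]
        apply loop_contained
        intro x hx
        rw [PySem.List.mem_pyRange_one] at hx
        rw [mem_pairs]
        exact ⟨m - x, by omega, by omega, Or.inr (by omega)⟩
  | succ n ih =>
    intro j hj hjn
    have hjK : j ≤ K := by omega
    have hjm : j < m := by omega
    rw [PySem.List.pyRange_one_cons hjm]
    have hnc : ((PySem.List.pyRange 1 j 1).flatMap (fun i => [i, m - i])).contains j = false := by
      simp only [List.contains_eq_mem, decide_eq_false_iff_not]
      rw [mem_pairs]; rintro ⟨i, h1, h2, h3⟩; omega
    have hnb : ¬ (j * 2 = m) := by omega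
    simp only [slwt_loop, hnc, Bool.false_eq_true, if_false, hnb]
    have happ : (PySem.List.pyRange 1 j 1).flatMap (fun i => [i, m - i]) ++ [j, m - j]
        = (PySem.List.pyRange 1 (j+1) 1).flatMap (fun i => [i, m - i]) := by
      rw [PySem.List.pyRange_one_succ_right hj, List.flatMap_append]; rfl
    rw [happ]
    exact ih (j+1) (by omega) (by omega)

-- A's helper equals B's closed-form row
lemma slwt_eq_terms (m : Int) : search_list_with_terms m = pvTerms m := by
  unfold search_list_with_terms pvTerms
  have hKdef : PySem.Int.floordiv (m-1) 2 = PySem.Int.floordiv (m-1) 2 := rfl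
  obtain ⟨hK1, hK2⟩ :
      PySem.Int.floordiv (m-1) 2 * 2 ≤ m - 1 ∧ m - 1 < (PySem.Int.floordiv (m-1) 2 + 1) * 2 :=
    (PySem.Int.floordiv_eq_iff_of_pos (by norm_num)).mp hKdef
  set K := PySem.Int.floordiv (m-1) 2 with hK
  by_cases hm : m ≤ 0
  · rw [PySem.List.pyRange_one_eq_nil (by omega), PySem.List.pyRange_one_eq_nil (by omega : (K:Int) + 1 ≤ 1)]
    rfl
  · have h := loop_fill m K (by omega) (by omega) K.toNat 1 (by omega) (by omega)
    rw [PySem.List.pyRange_one_eq_nil (le_refl 1)] at h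
    simpa using h

-- ===== VERDICT (by name: the statement is the Claim_ definition above) =====
theorem search_for_devisors_and_create_matrix_spec : Claim_equal_search_for_devisors_and_create_matrix := by
  intro num1 _
  show _ = _
  unfold search_for_devisors_and_create_matrix search_for_devisors_and_create_matrix_alt
  simp only [PySem.List.foldl_append_if_eq_filter, PySem.List.foldl_append_singleton_eq_map,
    List.nil_append]
  rw [funext slwt_eq_terms]
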